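-- pv_equiv track=rewrite | github.com/vikilpet/Taskopy | plugins/plugin_filesystem.py | file_name_fix
-- ===== SOURCE A (Python) =====
-- _FORBIDDEN_CHARS = '<>:"\\/|?*'
--
-- def file_name_fix(filename:str, repl_char:str='_')->str:
-- 	r'''
-- 	Replaces forbidden characters with the *repl_char*.
-- 	Don't use it with a full path or it will replace
-- 	all backslashes.
-- 	Removes the leading and trailing spaces and dots.
-- 	'''
-- 	new_fn = ''
-- 	for char in filename.strip(' .'):
-- 		if (char in _FORBIDDEN_CHARS
-- 		or ord(char) < 32):
-- 			new_fn += repl_char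
-- 		else:
-- 			new_fn += char
-- 	return new_fn
-- ===== SOURCE B (Python) =====
-- _FORBIDDEN_CHARS = '<>:"\\/|?*'
--
-- def file_name_fix(filename: str, repl_char: str = '_') -> str:
-- 	# Staged split-and-join: cut the stripped name into its runs of allowed
-- 	# characters (one split pass per forbidden/control character), then
-- 	# reassemble the runs with repl_char at every cut. Each cut corresponds
-- 	# to exactly one removed bad character, so joining restores A's output.
-- 	parts = [filename.strip(' .')]
-- 	for bad in _FORBIDDEN_CHARS + ''.join(map(chr, range(32))):
-- 		parts = [piece for part in parts for piece in part.split(bad)]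
-- 	return repl_char.join(parts)
-- ===== Notes on version B (the rewrite author's own statement) =====
-- stated objective: alternative
-- what changed: Replaces A's single per-character Python loop (membership test + string accumulation) by a staged split-and-join algorithm: the stripped name is cut into runs of allowed characters with one str.split pass per forbidden/control character, then the runs are joined once with repl_char; each cut boundary corresponds to exactly one removed bad character.
import Mathlib
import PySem

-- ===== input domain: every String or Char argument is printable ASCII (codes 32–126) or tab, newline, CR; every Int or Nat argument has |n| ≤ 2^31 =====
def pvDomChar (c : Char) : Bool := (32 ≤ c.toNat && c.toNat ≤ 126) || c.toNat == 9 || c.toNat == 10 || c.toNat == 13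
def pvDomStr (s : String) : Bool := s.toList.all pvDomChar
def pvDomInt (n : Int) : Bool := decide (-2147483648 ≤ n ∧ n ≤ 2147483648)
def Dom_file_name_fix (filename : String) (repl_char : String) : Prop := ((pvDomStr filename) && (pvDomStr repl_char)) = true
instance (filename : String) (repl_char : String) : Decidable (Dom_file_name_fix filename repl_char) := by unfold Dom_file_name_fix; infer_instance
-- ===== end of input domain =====

-- B replaces A's per-character accumulate loop by a staged split-and-join algorithm:
-- one split pass per forbidden/control character, then one join with repl_char (alternative).

-- ===== PORT A =====
def fnfForbiddenA : List Char := "<>:\"\\/|?*".toList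

def file_name_fix (filename : String) (repl_char : String) : String :=
  -- new_fn = ''; for char in filename.strip(' .'): … ; return new_fn
  String.ofList ((PySem.Chars.stripChars filename.toList [' ', '.']).foldl
    (fun new_fn c =>
      if PySem.Chars.isIn [c] fnfForbiddenA || c.toNat < 32 then
        new_fn ++ repl_char.toList
      else
        new_fn ++ [c]) [])

-- ===== PORT B =====
def fnfForbiddenB : List Char := "<>:\"\\/|?*".toList

-- _FORBIDDEN_CHARS + ''.join(map(chr, range(32)))
def fnfBadB : List Char := fnfForbiddenB ++ (List.range 32).map Char.ofNat

def file_name_fix_alt (filename : String) (repl_char : String) : String :=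
  -- parts = [filename.strip(' .')]
  -- for bad in …: parts = [piece for part in parts for piece in part.split(bad)]
  -- return repl_char.join(parts)
  String.ofList (PySem.Chars.join repl_char.toList
    (fnfBadB.foldl
      (fun parts bad => parts.flatMap (fun part => PySem.Chars.splitOn part [bad]))
      [PySem.Chars.stripChars filename.toList [' ', '.']]))

-- ===== PRECONDITION & SPEC =====
def Spec_file_name_fix (filename : String) (repl_char : String) (out : String) : Prop := out = file_name_fix_alt filename repl_char
instance (filename : String) (repl_char : String) (out : String) : Decidable (Spec_file_name_fix filename repl_char out) := by unfold Spec_file_name_fix; infer_instance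

-- ===== CLAIM (what is proved, stated in full; the proofs are below) =====
def Claim_equal_file_name_fix : Prop := ∀ (filename : String) (repl_char : String), Dom_file_name_fix filename repl_char → Spec_file_name_fix filename repl_char (file_name_fix filename repl_char)

-- ===== LEMMAS AND PROOFS =====

-- splitting a char list at every occurrence of one character (Python str.split(sep), |sep| = 1)
def fnfSplitChar (b : Char) : List Char → List (List Char)
  | [] => [[]]
  | c :: t => if c = b then [] :: fnfSplitChar b t
              else (fnfSplitChar b t).modifyHead (c :: ·)

lemma fnfSplitChar_ne_nil (b : Char) (s : List Char) : fnfSplitChar b s ≠ [] := by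
  cases s with
  | nil => simp [fnfSplitChar]
  | cons c t =>
    simp only [fnfSplitChar]
    split
    · simp
    · cases h : fnfSplitChar b t with
      | nil => exact absurd h (fnfSplitChar_ne_nil b t)
      | cons x xs => simp

lemma fnf_go_single (b : Char) (fuel : Nat) (s cur : List Char)
    (acc : List (List Char)) (h : s.length ≤ fuel) :
    PySem.Chars.splitOn.go [b] fuel s cur acc =
      acc.reverse ++ (fnfSplitChar b s).modifyHead (cur.reverse ++ ·) := by
  induction fuel generalizing s cur acc with
  | zero =>
    have hs : s = [] := List.length_eq_zero_iff.mp (Nat.le_zero.mp h)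
    subst hs
    simp [PySem.Chars.splitOn.go, fnfSplitChar]
  | succ fuel ih =>
    cases s with
    | nil => simp [PySem.Chars.splitOn.go, fnfSplitChar]
    | cons c rest =>
      simp only [PySem.Chars.splitOn.go]
      by_cases hc : c = b
      · subst hc
        have hpre : List.isPrefixOf [c] (c :: rest) = true := by
          simp [List.isPrefixOf]
        rw [if_pos hpre]
        have h' : rest.length ≤ fuel := by simpa using Nat.succ_le_succ_iff.mp (by simpa using h)
        rw [show List.drop (List.length [c]) (c :: rest) = rest by simp]
        rw [ih rest [] (cur.reverse :: acc) h']
        simp only [fnfSplitChar, List.reverse_cons, List.reverse_nil,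
          List.nil_append, List.modifyHead]
        simp [List.append_assoc]
        cases fnfSplitChar c rest <;> simp
      · have hpre : List.isPrefixOf [b] (c :: rest) = false := by
          simp [List.isPrefixOf]
          exact fun hh => hc hh.symm
        rw [if_neg (by simp [hpre])]
        have h' : rest.length ≤ fuel := by simpa using Nat.succ_le_succ_iff.mp (by simpa using h)
        rw [ih rest (c :: cur) acc h']
        simp only [fnfSplitChar, if_neg hc]
        cases hr : fnfSplitChar b rest with
        | nil => exact absurd hr (fnfSplitChar_ne_nil b rest)
        | cons x xs => simp [List.reverse_cons]

lemma fnf_splitOn_single (b : Char) (s : List Char) :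
    PySem.Chars.splitOn s [b] = fnfSplitChar b s := by
  have := fnf_go_single b (s.length + 1) s [] [] (by omega)
  simp only [List.reverse_nil, List.nil_append] at this
  have h2 : (fnfSplitChar b s).modifyHead (fun x => x) = fnfSplitChar b s := by
    cases h : fnfSplitChar b s with
    | nil => rfl
    | cons x xs => simp
  rw [PySem.Chars.splitOn, this, h2]

-- join r (xs ++ ys) splits when both halves are nonempty
lemma fnf_join_append (r : List Char) (xs ys : List (List Char))
    (hx : xs ≠ []) (hy : ys ≠ []) :
    PySem.Chars.join r (xs ++ ys)
      = PySem.Chars.join r xs ++ r ++ PySem.Chars.join r ys := by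
  induction xs with
  | nil => exact absurd rfl hx
  | cons x xs ih =>
    cases xs with
    | nil =>
      cases ys with
      | nil => exact absurd rfl hy
      | cons y ys => simp [PySem.Chars.join_cons_cons, PySem.Chars.join_singleton]
    | cons x2 xs2 =>
      have : PySem.Chars.join r ((x2 :: xs2) ++ ys)
          = PySem.Chars.join r (x2 :: xs2) ++ r ++ PySem.Chars.join r ys :=
        ih (by simp)
      cases hys : (x2 :: xs2) ++ ys with
      | nil => simp at hys
      | cons z zs =>
        rw [show (x :: x2 :: xs2) ++ ys = x :: ((x2 :: xs2) ++ ys) by simp, hys,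
            PySem.Chars.join_cons_cons, ← hys, this, PySem.Chars.join_cons_cons]
        simp [List.append_assoc]

lemma fnf_flatMap_ne_nil {α β : Type} (f : α → List β) (p : α) (ps : List α)
    (hf : ∀ q, f q ≠ []) : (p :: ps).flatMap f ≠ [] := by
  simp only [List.flatMap_cons]
  intro h
  exact hf p (List.append_eq_nil_iff.mp h).1

-- join over a flatMap whose pieces are nonempty = join of the per-element joins
lemma fnf_join_flatMap (r : List Char) (ps : List (List Char))
    (f : List Char → List (List Char)) (hf : ∀ q, f q ≠ []) :
    PySem.Chars.join r (ps.flatMap f)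
      = PySem.Chars.join r (ps.map (fun p => PySem.Chars.join r (f p))) := by
  induction ps with
  | nil => simp
  | cons p ps ih =>
    cases ps with
    | nil => simp [PySem.Chars.join_singleton]
    | cons q qs =>
      rw [List.flatMap_cons,
          fnf_join_append r (f p) ((q :: qs).flatMap f) (hf p)
            (fnf_flatMap_ne_nil f q qs hf),
          ih]
      cases hm : (q :: qs).map (fun p => PySem.Chars.join r (f p)) with
      | nil => simp at hm
      | cons z zs =>
        rw [List.map_cons, hm, PySem.Chars.join_cons_cons]

-- the per-character substitution both programs realise
def fnfSubst (r : List Char) (bl : List Char) (seg : List Char) : List Char :=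
  seg.flatMap (fun c => if c ∈ bl then r else [c])

lemma fnf_join_cons_append (r x y : List Char) (l : List (List Char)) :
    PySem.Chars.join r ((x ++ y) :: l) = x ++ PySem.Chars.join r (y :: l) := by
  cases l with
  | nil => simp [PySem.Chars.join_singleton]
  | cons z zs => simp [PySem.Chars.join_cons_cons, List.append_assoc]

-- per-segment: splitting on bad then substituting the remaining bad chars and
-- joining with r is the full substitution on the segment
lemma fnf_split_join (r : List Char) (b : Char) (rest : List Char) (p : List Char) :
    PySem.Chars.join r ((fnfSplitChar b p).map (fnfSubst r rest))
      = fnfSubst r (b :: rest) p := by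
  induction p with
  | nil => simp [fnfSplitChar, fnfSubst, PySem.Chars.join_singleton]
  | cons c t ih =>
    by_cases hc : c = b
    · subst hc
      rw [show fnfSplitChar c (c :: t) = [] :: fnfSplitChar c t by simp [fnfSplitChar]]
      cases hm : (fnfSplitChar c t).map (fnfSubst r rest) with
      | nil => exact absurd (List.map_eq_nil_iff.mp hm) (fnfSplitChar_ne_nil c t)
      | cons z zs =>
        rw [List.map_cons, hm, PySem.Chars.join_cons_cons, ← hm, ih]
        simp [fnfSubst]
    · cases hr : fnfSplitChar b t with
      | nil => exact absurd hr (fnfSplitChar_ne_nil b t)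
      | cons h tl =>
        rw [show fnfSplitChar b (c :: t) = (c :: h) :: tl by
              simp [fnfSplitChar, hc, hr]]
        rw [List.map_cons]
        have hch : fnfSubst r rest (c :: h)
            = (if c ∈ rest then r else [c]) ++ fnfSubst r rest h := by
          simp [fnfSubst]
        rw [hch, fnf_join_cons_append, ← List.map_cons, ← hr, ih]
        simp [fnfSubst, hc]

-- main invariant of B's staged loop
lemma fnf_stage_loop (r : List Char) (bl : List Char) (ps : List (List Char)) :
    PySem.Chars.join r
        (bl.foldl (fun parts bad => parts.flatMap (fun part => PySem.Chars.splitOn part [bad])) ps)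
      = PySem.Chars.join r (ps.map (fnfSubst r bl)) := by
  induction bl generalizing ps with
  | nil =>
    simp only [List.foldl_nil]
    congr 1
    refine ((List.map_congr_left fun p _ => ?_).trans (List.map_id ps)).symm
    simp [fnfSubst]
  | cons b rest ih =>
    rw [List.foldl_cons, ih]
    have hsp : (fun part => PySem.Chars.splitOn part [b]) = fnfSplitChar b :=
      funext fun p => fnf_splitOn_single b p
    rw [hsp, List.map_flatMap,
        fnf_join_flatMap r ps (fun p => (fnfSplitChar b p).map (fnfSubst r rest))
          (fun q => by
            cases hq : fnfSplitChar b q with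
            | nil => exact absurd hq (fnfSplitChar_ne_nil b q)
            | cons x xs => simp [hq])]
    congr 1
    exact List.map_congr_left fun p _ => fnf_split_join r b rest p

lemma fnf_isIn_singleton (c : Char) (l : List Char) :
    PySem.Chars.isIn [c] l = true ↔ c ∈ l := by
  rw [PySem.Chars.isIn_iff_infix]
  constructor
  · intro h; exact h.mem (by simp)
  · intro h; obtain ⟨a, b, rfl⟩ := List.mem_iff_append.mp h; exact ⟨a, b, by simp⟩

lemma fnf_mem_ctrl (c : Char) : c ∈ (List.range 32).map Char.ofNat ↔ c.toNat < 32 := by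
  constructor
  · intro h
    obtain ⟨n, hn, rfl⟩ := List.mem_map.mp h
    have hn32 : n < 32 := List.mem_range.mp hn
    interval_cases n <;> decide
  · intro h
    refine List.mem_map.mpr ⟨c.toNat, List.mem_range.mpr h, ?_⟩
    exact Char.ofNat_toNat c

lemma fnf_mem_bad (c : Char) :
    c ∈ fnfBadB ↔ (PySem.Chars.isIn [c] fnfForbiddenA || c.toNat < 32) = true := by
  rw [fnfBadB, List.mem_append, fnf_mem_ctrl]
  have : fnfForbiddenB = fnfForbiddenA := rfl
  rw [this, Bool.or_eq_true, decide_eq_true_iff, fnf_isIn_singleton]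

lemma fnf_foldl_eq_flatMap (repl_char : String) (l : List Char) :
    (l.foldl (fun new_fn c =>
        if PySem.Chars.isIn [c] fnfForbiddenA || c.toNat < 32 then
          new_fn ++ repl_char.toList
        else
          new_fn ++ [c]) [])
      = l.flatMap (fun c =>
          if PySem.Chars.isIn [c] fnfForbiddenA || c.toNat < 32 then repl_char.toList else [c]) := by
  have hbody : (fun (new_fn : List Char) (c : Char) =>
        if PySem.Chars.isIn [c] fnfForbiddenA || c.toNat < 32 then
          new_fn ++ repl_char.toList
        else
          new_fn ++ [c])
      = (fun new_fn c => new_fn ++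
          (if PySem.Chars.isIn [c] fnfForbiddenA || c.toNat < 32 then repl_char.toList else [c])) := by
    funext new_fn c; split <;> rfl
  rw [hbody, PySem.List.foldl_append_eq_flatMap]
  simp

-- ===== VERDICT (by name: the statement is the Claim_ definition above) =====
theorem file_name_fix_spec : Claim_equal_file_name_fix := by
  intro filename repl_char _
  unfold Spec_file_name_fix file_name_fix file_name_fix_alt
  rw [fnf_foldl_eq_flatMap, fnf_stage_loop]
  rw [List.map_singleton, PySem.Chars.join_singleton]
  congr 1
  unfold fnfSubst
  refine List.flatMap_congr fun c _ => ?_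
  by_cases h : c ∈ fnfBadB
  · rw [if_pos h, if_pos ((fnf_mem_bad c).mp h)]
  · rw [if_neg h, if_neg (fun hh => h ((fnf_mem_bad c).mpr hh))]
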